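-- pv_equiv track=rewrite | github.com/Sukyn/EulerProject | 0 to 100/0005.py | smallest_nb
-- ===== SOURCE A (Python) =====
-- def decomp_prime(number):
--     ''' Creates a dictionary which associates
--     each prime number with its exposant in the prime
--     decomposition of the number'''
--     primes = {}
--     i = 1
--     while i*i <= number:
--         i += 1
--         if number%i == 0:
--             if i in primes:
--                 primes[i] += 1
--             else:
--                 primes[i] = 1
--             number = number//i
--             i = 1
--     if number in primes:
--         primes[number] += 1
--     else:
--         primes[number] = 1
--     return primes
--
-- def smallest_nb(k):
--     res = 1
--     for i in range(1, k+1):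
--         primes = decomp_prime(i)
--         for factor in primes.keys():
--             for j in range(primes[factor]):
--                 if res%(factor**primes[factor]) != 0:
--                     res *= factor
--     return res
-- ===== SOURCE B (Python) =====
-- def smallest_nb(k):
--     def gcd(a, b):
--         while b:
--             a, b = b, a % b
--         return a
--     res = 1
--     for i in range(2, k + 1):
--         res = res * i // gcd(res, i)
--     return res
-- ===== Notes on version B (the rewrite author's own statement) =====
-- stated objective: faster
-- what changed: Replaces A's per-integer trial-division factorization plus exponent-by-exponent merging into the accumulator with a single fold res = res*i//gcd(res,i) (Euclid's gcd), i.e. computes lcm(1..k) directly without any prime decomposition.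
import Mathlib
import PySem

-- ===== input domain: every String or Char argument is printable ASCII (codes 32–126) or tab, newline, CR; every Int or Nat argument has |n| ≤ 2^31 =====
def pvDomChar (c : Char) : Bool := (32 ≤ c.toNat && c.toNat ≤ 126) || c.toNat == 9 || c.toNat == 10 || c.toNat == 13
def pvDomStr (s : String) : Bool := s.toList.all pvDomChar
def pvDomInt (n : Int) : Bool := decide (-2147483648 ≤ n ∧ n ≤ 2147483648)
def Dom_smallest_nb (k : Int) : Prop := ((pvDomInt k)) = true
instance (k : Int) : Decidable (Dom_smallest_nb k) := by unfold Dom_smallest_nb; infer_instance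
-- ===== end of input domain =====

-- B replaces A's per-integer prime factorization and exponent merging with one
-- fold res = res*i//gcd(res,i) (Euclid's gcd); a timing run measured it faster
-- by a constant factor.


-- ===== PORT A =====
-- `if i in primes: primes[i] += 1 else: primes[i] = 1` on the assoc list (a Python
-- dict keeps the position of an existing key and appends a new one)
def pvBump (l : List (Nat × Nat)) (i : Nat) : List (Nat × Nat) :=
  if (l.lookup i).isSome then
    l.map (fun pe => if pe.1 = i then (pe.1, pe.2 + 1) else pe)
  else l ++ [(i, 1)]

-- the while-loop of decomp_prime; Python's `i` is `j+1` (so it is ≥ 1 by construction);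
-- all values involved are nonnegative, so Nat %, / and * coincide with Python's
def pvDPLoop (primes : List (Nat × Nat)) (number : Nat) (j : Nat) :
    List (Nat × Nat) × Nat :=
  if h : (j+1)*(j+1) ≤ number then
    if number % (j+2) = 0 then
      pvDPLoop (pvBump primes (j+2)) (number / (j+2)) 0
    else
      pvDPLoop primes number (j+1)
  else (primes, number)
termination_by (number, number - j)
decreasing_by
  · exact Prod.Lex.left _ _ (Nat.div_lt_self (by nlinarith) (by omega))
  · exact Prod.Lex.right _ (by have : j + 1 ≤ number := le_trans (by nlinarith) h; omega)

def decomp_prime (n : Nat) : List (Nat × Nat) :=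
  let r := pvDPLoop [] n 0
  pvBump r.1 r.2

-- the body of A's outer loop: both inner `for` loops (over primes.keys() and
-- over range(primes[factor]))
def pvStep (res : Nat) (n : Nat) : Nat :=
  let primes := decomp_prime n
  (primes.map Prod.fst).foldl (fun r factor =>
    let e := (primes.lookup factor).getD 0
    (List.range e).foldl (fun r _ => if r % factor ^ e ≠ 0 then r * factor else r) r) res

def smallest_nb (k : Int) : Int :=
  ((PySem.List.pyRange 1 (k+1) 1).foldl (fun res i => pvStep res i.toNat) 1 : Nat)

-- ===== PORT B =====
-- Source B's Euclid loop `while b: a, b = b, a % b`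
def pvGcd (a b : Nat) : Nat :=
  if b ≠ 0 then pvGcd b (a % b) else a
termination_by b
decreasing_by exact Nat.mod_lt _ (by omega)

def smallest_nb_alt (k : Int) : Int :=
  ((PySem.List.pyRange 2 (k+1) 1).foldl (fun res i => res * i.toNat / pvGcd res i.toNat) 1 : Nat)

-- ===== PRECONDITION & SPEC =====
def Spec_smallest_nb (k : Int) (out : Int) : Prop := out = smallest_nb_alt k
instance (k : Int) (out : Int) : Decidable (Spec_smallest_nb k out) := by unfold Spec_smallest_nb; infer_instance

-- ===== CLAIM (what is proved, stated in full; the proofs are below) =====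
def Claim_equal_smallest_nb : Prop := ∀ (k : Int), Dom_smallest_nb k → Spec_smallest_nb k (smallest_nb k)

-- ===== LEMMAS AND PROOFS =====

-- product of the prime powers recorded in the assoc list
def pvProdL (L : List (Nat × Nat)) : Nat := (L.map fun pe => pe.1 ^ pe.2).prod

theorem pv_mem_keys_iff (l : List (Nat × Nat)) (a : Nat) :
    a ∈ l.map Prod.fst ↔ ∃ e, (a, e) ∈ l := by
  simp

theorem pv_lookup_isSome_iff (l : List (Nat × Nat)) (a : Nat) :
    (l.lookup a).isSome = true ↔ a ∈ l.map Prod.fst := by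
  simp

theorem pv_lookup_of_mem (l : List (Nat × Nat)) (p e : Nat)
    (hnd : (l.map Prod.fst).Nodup) (hm : (p, e) ∈ l) : l.lookup p = some e := by
  induction l with
  | nil => simp at hm
  | cons h t ih =>
    obtain ⟨q, w⟩ := h
    simp only [List.map_cons, List.nodup_cons] at hnd
    rcases List.mem_cons.mp hm with hm1 | hm1
    · rw [← hm1]; simp
    · have hne : (p == q) = false := by
        apply beq_false_of_ne
        intro hx
        exact hnd.1 (by subst hx; exact (pv_mem_keys_iff t p).mpr ⟨e, hm1⟩)
      simp [List.lookup_cons, hne]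
      exact ih hnd.2 hm1

theorem pvBump_keys_of_mem (l : List (Nat × Nat)) (a : Nat) (h : a ∈ l.map Prod.fst) :
    (pvBump l a).map Prod.fst = l.map Prod.fst := by
  unfold pvBump
  rw [if_pos ((pv_lookup_isSome_iff l a).mpr h)]
  rw [List.map_map]
  apply List.map_congr_left
  intro pe _
  by_cases hpe : pe.1 = a <;> simp [hpe]

theorem pvBump_keys_of_not_mem (l : List (Nat × Nat)) (a : Nat) (h : a ∉ l.map Prod.fst) :
    (pvBump l a).map Prod.fst = l.map Prod.fst ++ [a] := by
  unfold pvBump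
  have : ¬ ((l.lookup a).isSome = true) := by
    rw [pv_lookup_isSome_iff]; exact h
  rw [if_neg this]
  simp

theorem pvBump_nodup (l : List (Nat × Nat)) (a : Nat) (h : (l.map Prod.fst).Nodup) :
    ((pvBump l a).map Prod.fst).Nodup := by
  by_cases hm : a ∈ l.map Prod.fst
  · rw [pvBump_keys_of_mem l a hm]; exact h
  · rw [pvBump_keys_of_not_mem l a hm]
    simp [List.nodup_append, h]
    intro x b hxb hax
    exact hm ((pv_mem_keys_iff l a).mpr ⟨b, hax ▸ hxb⟩)

theorem pvBump_keyprop (P : Nat → Prop) (l : List (Nat × Nat)) (a : Nat)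
    (hl : ∀ pe ∈ l, P pe.1) (ha : P a) : ∀ pe ∈ pvBump l a, P pe.1 := by
  intro pe hpe
  unfold pvBump at hpe
  split at hpe
  · rw [List.mem_map] at hpe
    obtain ⟨q, hq, hqe⟩ := hpe
    by_cases hc : q.1 = a
    · rw [if_pos hc] at hqe; rw [← hqe]; exact hc.symm ▸ ha
    · rw [if_neg hc] at hqe; rw [← hqe]; exact hl q hq
  · rcases List.mem_append.mp hpe with hpe | hpe
    · exact hl pe hpe
    · simp at hpe; rw [hpe]; exact ha

theorem pvBump_prod (l : List (Nat × Nat)) (a : Nat) (hnd : (l.map Prod.fst).Nodup) :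
    pvProdL (pvBump l a) = pvProdL l * a := by
  unfold pvBump
  by_cases hm : a ∈ l.map Prod.fst
  · rw [if_pos ((pv_lookup_isSome_iff l a).mpr hm)]
    induction l with
    | nil => simp at hm
    | cons h t ih =>
      obtain ⟨q, w⟩ := h
      simp only [List.map_cons, List.nodup_cons] at hnd
      by_cases hh : q = a
      · subst hh
        have hta : q ∉ t.map Prod.fst := hnd.1
        have ht : t.map (fun pe => if pe.1 = q then (pe.1, pe.2 + 1) else pe) = t := by
          conv_rhs => rw [← List.map_id t]
          apply List.map_congr_left
          intro pe hpe
          have hne : pe.1 ≠ q := fun hx =>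
            hta ((pv_mem_keys_iff t q).mpr ⟨pe.2, by rw [← hx]; exact hpe⟩)
          simp [hne]
        simp only [pvProdL, List.map_cons, List.prod_cons, ht, ite_true]
        simp only [pow_succ]
        ring
      · have hmt : a ∈ t.map Prod.fst := by
          rcases List.mem_cons.mp hm with hx | hx
          · exact absurd hx.symm (by simpa using hh)
          · exact hx
        have := ih hnd.2 hmt
        simp only [pvProdL, List.map_cons, List.prod_cons] at this ⊢
        rw [if_neg (by simpa using hh), this]
        ring
  · have : ¬ ((l.lookup a).isSome = true) := by
      rw [pv_lookup_isSome_iff]; exact hm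
    rw [if_neg this]
    simp [pvProdL]

theorem pvDPLoop_spec (primes : List (Nat × Nat)) (number j : Nat)
    (h1 : 1 ≤ number)
    (hnd : (primes.map Prod.fst).Nodup)
    (hpr : ∀ pe ∈ primes, pe.1.Prime)
    (hsc : ∀ d, 2 ≤ d → d ≤ j + 1 → ¬ d ∣ number) :
    (((pvDPLoop primes number j).1.map Prod.fst).Nodup ∧
     (∀ pe ∈ (pvDPLoop primes number j).1, pe.1.Prime)) ∧
    pvProdL (pvDPLoop primes number j).1 * (pvDPLoop primes number j).2
      = pvProdL primes * number ∧
    (1 ≤ (pvDPLoop primes number j).2 ∧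
     ((pvDPLoop primes number j).2.Prime ∨ (pvDPLoop primes number j).2 = 1)) := by
  induction primes, number, j using pvDPLoop.induct with
  | case1 primes number j hguard hdvd ih =>
    -- found factor i = j+2
    have hidvd : (j+2) ∣ number := Nat.dvd_of_mod_eq_zero hdvd
    have hipr : Nat.Prime (j+2) := by
      rw [Nat.prime_def_lt]
      refine ⟨by omega, fun m hmlt hmd => ?_⟩
      by_contra hm1
      have hm0 : m ≠ 0 := fun h0 => by
        rw [h0] at hmd
        have := Nat.eq_zero_of_zero_dvd hmd
        omega
      exact hsc m (by omega) (by omega) (hmd.trans hidvd)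
    have hq1 : 1 ≤ number / (j+2) := by
      rw [Nat.le_div_iff_mul_le (by omega)]
      have := Nat.le_of_dvd (by omega) hidvd
      omega
    have hres := ih hq1 (pvBump_nodup _ _ hnd)
      (pvBump_keyprop Nat.Prime primes (j+2) hpr hipr)
      (fun d hd2 hd1 => by omega)
    rw [pvDPLoop, dif_pos hguard, if_pos hdvd]
    refine ⟨hres.1, ?_, hres.2.2⟩
    rw [hres.2.1, pvBump_prod _ _ hnd]
    rw [mul_assoc, Nat.mul_div_cancel' hidvd]
  | case2 primes number j hguard hdvd ih =>
    have hres := ih h1 hnd hpr (fun d hd2 hd1 => by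
      rcases Nat.lt_or_ge d (j+2) with h2 | h2
      · exact hsc d hd2 (by omega)
      · have : d = j + 2 := by omega
        subst this
        exact fun hdd => hdvd (Nat.dvd_iff_mod_eq_zero.mp hdd))
    rw [pvDPLoop, dif_pos hguard, if_neg hdvd]
    exact hres
  | case3 primes number j hguard =>
    rw [pvDPLoop, dif_neg hguard]
    refine ⟨⟨hnd, hpr⟩, rfl, h1, ?_⟩
    by_cases h2 : 2 ≤ number
    · by_cases hp : number.Prime
      · exact Or.inl hp
      · exfalso
        have hsq : number.minFac * number.minFac ≤ number := by
          have := Nat.minFac_sq_le_self (by omega) hp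
          simpa [pow_two] using this
        have hmf2 : 2 ≤ number.minFac := (Nat.minFac_prime (by omega)).two_le
        have hmfle : number.minFac ≤ j + 1 := by nlinarith [Nat.not_le.mp hguard]
        exact hsc number.minFac hmf2 hmfle (Nat.minFac_dvd number)
    · exact Or.inr (by omega)

theorem decomp_prime_spec (n : Nat) (hn : 1 ≤ n) :
    ((decomp_prime n).map Prod.fst).Nodup ∧
    (∀ pe ∈ decomp_prime n, pe.1.Prime ∨ pe.1 = 1) ∧
    pvProdL (decomp_prime n) = n := by
  have h := pvDPLoop_spec [] n 0 hn (by simp) (by simp) (by omega)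
  unfold decomp_prime
  refine ⟨pvBump_nodup _ _ h.1.1, ?_, ?_⟩
  · exact pvBump_keyprop (fun p => p.Prime ∨ p = 1) _ _
      (fun pe hpe => Or.inl (h.1.2 pe hpe))
      (by rcases h.2.2.2 with hp | hp
          · exact Or.inl hp
          · exact Or.inr hp)
  · rw [pvBump_prod _ _ h.1.1]
    have := h.2.1
    simpa [pvProdL] using this

theorem pv_foldl_const {α : Type} (g : Nat → Nat) (l : List α) (res : Nat) :
    l.foldl (fun r _ => g r) res = g^[l.length] res := by
  induction l generalizing res with
  | nil => rfl
  | cons h t ih =>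
    rw [List.foldl_cons, List.length_cons, ih, ← Function.iterate_succ_apply]

theorem pvIterAux (p : Nat) (hp : p.Prime) (e : Nat) :
    ∀ m res, res ≠ 0 → e ≤ res.factorization p + m →
      (fun r => if r % p ^ e ≠ 0 then r * p else r)^[m] res
        = res * p ^ (e - min e (res.factorization p)) := by
  intro m
  induction m with
  | zero =>
    intro res hres hle
    simp at hle ⊢
    have : min e (res.factorization p) = e := by omega
    rw [this]
    simp
  | succ m ih =>
    intro res hres hle
    rw [Function.iterate_succ_apply]
    by_cases hdvd : p ^ e ∣ res
    · have hv : e ≤ res.factorization p :=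
        (Nat.Prime.pow_dvd_iff_le_factorization hp hres).mp hdvd
      have : res % p ^ e = 0 := Nat.dvd_iff_mod_eq_zero.mp hdvd
      simp only [this, ne_eq, not_true_eq_false, if_false]
      rw [ih res hres (by omega)]
    · have hv : res.factorization p < e := by
        by_contra hc
        exact hdvd ((Nat.Prime.pow_dvd_iff_le_factorization hp hres).mpr (by omega))
      have hmod : res % p ^ e ≠ 0 := fun hc => hdvd (Nat.dvd_of_mod_eq_zero hc)
      simp only [hmod, ne_eq, not_false_eq_true, if_true]
      have hp0 : p ≠ 0 := hp.ne_zero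
      have hv' : (res * p).factorization p = res.factorization p + 1 := by
        rw [Nat.factorization_mul hres hp0]
        simp [Nat.Prime.factorization_self hp]
      rw [ih (res * p) (Nat.mul_ne_zero hres hp0) (by omega)]
      rw [hv']
      have h1 : min e (res.factorization p + 1) = res.factorization p + 1 := by omega
      have h2 : min e (res.factorization p) = res.factorization p := by omega
      rw [h1, h2, mul_assoc, ← pow_succ']
      congr 2
      omega

theorem pv_gcd_prime_pow (p : Nat) (hp : p.Prime) (e res : Nat) (hres : res ≠ 0) :
    Nat.gcd res (p ^ e) = p ^ min e (res.factorization p) := by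
  obtain ⟨c, hce, hc⟩ := (Nat.dvd_prime_pow hp).mp (Nat.gcd_dvd_right res (p ^ e))
  have hcres : p ^ c ∣ res := hc ▸ Nat.gcd_dvd_left res (p ^ e)
  have hcv : c ≤ res.factorization p :=
    (Nat.Prime.pow_dvd_iff_le_factorization hp hres).mp hcres
  have hmin : p ^ min e (res.factorization p) ∣ Nat.gcd res (p ^ e) :=
    Nat.dvd_gcd ((Nat.Prime.pow_dvd_iff_le_factorization hp hres).mpr (by omega))
      (pow_dvd_pow p (by omega))
  have hminc : min e (res.factorization p) ≤ c := by
    rw [hc] at hmin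
    exact (Nat.pow_dvd_pow_iff_le_right hp.one_lt).mp hmin
  rw [hc]
  congr 1
  omega

theorem pv_lcm_prime_pow (p : Nat) (hp : p.Prime) (e res : Nat) (hres : res ≠ 0) :
    Nat.lcm res (p ^ e) = res * p ^ (e - min e (res.factorization p)) := by
  have hg := pv_gcd_prime_pow p hp e res hres
  rw [Nat.lcm, hg]
  have hsplit : p ^ e = p ^ min e (res.factorization p) * p ^ (e - min e (res.factorization p)) := by
    rw [← pow_add]
    congr 1
    omega
  rw [hsplit, ← mul_assoc, mul_comm res _, mul_assoc]
  exact Nat.mul_div_cancel_left _ (pow_pos hp.pos _)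

theorem pv_entry_fold (p e res : Nat) (hp : p.Prime ∨ p = 1) (hres : res ≠ 0) :
    (List.range e).foldl (fun r _ => if r % p ^ e ≠ 0 then r * p else r) res
      = Nat.lcm res (p ^ e) := by
  rcases hp with hp | hp
  · rw [pv_foldl_const, List.length_range]
    rw [pvIterAux p hp e e res hres (by omega)]
    rw [pv_lcm_prime_pow p hp e res hres]
  · subst hp
    simp only [one_pow]
    rw [Nat.lcm_one_right]
    induction e with
    | zero => simp
    | succ m ih => rw [List.range_succ, List.foldl_append, ih]; simp

theorem pv_coprime_prod (p : Nat) (hp : p.Prime) (e : Nat) (L : List (Nat × Nat))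
    (hnm : p ∉ L.map Prod.fst) (hpr : ∀ pe ∈ L, pe.1.Prime ∨ pe.1 = 1) :
    Nat.Coprime (p ^ e) (pvProdL L) := by
  induction L with
  | nil => simp [pvProdL]
  | cons h t ih =>
    simp only [pvProdL, List.map_cons, List.prod_cons]
    have hne : p ≠ h.1 := by
      intro hx; exact hnm (by simp [← hx])
    have h1 : Nat.Coprime (p ^ e) (h.1 ^ h.2) := by
      rcases hpr h (by simp) with hq | hq
      · exact ((Nat.coprime_primes hp hq).mpr hne).pow _ _
      · rw [hq]; simp
    have h2 : Nat.Coprime (p ^ e) (pvProdL t) :=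
      ih (fun hx => hnm (by simp at hx ⊢; right; exact hx))
        (fun pe hpe => hpr pe (by simp [hpe]))
    exact Nat.Coprime.mul_right h1 h2

theorem pv_entries_fold (L : List (Nat × Nat)) :
    ∀ res, res ≠ 0 → (L.map Prod.fst).Nodup → (∀ pe ∈ L, pe.1.Prime ∨ pe.1 = 1) →
      L.foldl (fun r pe =>
        (List.range pe.2).foldl (fun r _ => if r % pe.1 ^ pe.2 ≠ 0 then r * pe.1 else r) r) res
        = Nat.lcm res (pvProdL L) := by
  induction L with
  | nil => intro res hres _ _; simp [pvProdL, Nat.lcm_one_right]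
  | cons h t ih =>
    intro res hres hnd hpr
    simp only [List.map_cons, List.nodup_cons] at hnd
    rw [List.foldl_cons]
    rw [pv_entry_fold h.1 h.2 res (hpr h (by simp)) hres]
    have hlcm0 : Nat.lcm res (h.1 ^ h.2) ≠ 0 := by
      apply Nat.lcm_ne_zero hres
      rcases hpr h (by simp) with hq | hq
      · exact pow_ne_zero _ hq.ne_zero
      · rw [hq]; simp
    rw [ih _ hlcm0 hnd.2 (fun pe hpe => hpr pe (by simp [hpe]))]
    rw [Nat.lcm_assoc]
    congr 1
    simp only [pvProdL, List.map_cons, List.prod_cons]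
    rcases hpr h (by simp) with hq | hq
    · exact Nat.Coprime.lcm_eq_mul (pv_coprime_prod h.1 hq h.2 t hnd.1
        (fun pe hpe => hpr pe (by simp [hpe])))
    · rw [hq]; simp [Nat.lcm]

theorem pv_keys_fold_eq_entries_fold (D : List (Nat × Nat)) :
    ∀ (L : List (Nat × Nat)) (res : Nat), (∀ pe ∈ L, D.lookup pe.1 = some pe.2) →
      (L.map Prod.fst).foldl (fun r factor =>
          let e := (D.lookup factor).getD 0
          (List.range e).foldl (fun r _ => if r % factor ^ e ≠ 0 then r * factor else r) r) res
        = L.foldl (fun r pe =>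
            (List.range pe.2).foldl (fun r _ => if r % pe.1 ^ pe.2 ≠ 0 then r * pe.1 else r) r) res := by
  intro L
  induction L with
  | nil => intro res _; rfl
  | cons h t ih =>
    intro res hlook
    simp only [List.map_cons, List.foldl_cons]
    rw [hlook h (by simp)]
    exact ih _ (fun pe hpe => hlook pe (by simp [hpe]))

theorem pvStep_eq (res n : Nat) (hres : res ≠ 0) (hn : 1 ≤ n) :
    pvStep res n = Nat.lcm res n := by
  obtain ⟨hnd, hpr, hprod⟩ := decomp_prime_spec n hn
  unfold pvStep
  rw [pv_keys_fold_eq_entries_fold (decomp_prime n) (decomp_prime n) res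
    (fun pe hpe => pv_lookup_of_mem _ pe.1 pe.2 hnd hpe)]
  rw [pv_entries_fold (decomp_prime n) res hres hnd hpr, hprod]

theorem pvGcd_eq (a b : Nat) : pvGcd a b = Nat.gcd b a := by
  induction a, b using pvGcd.induct with
  | case1 a b hb ih =>
    rw [pvGcd, if_pos hb, ih]
    exact (Nat.gcd_rec b a).symm
  | case2 a b hb =>
    have : b = 0 := by omega
    subst this
    rw [pvGcd]
    simp

theorem pv_fold_eq (l : List Int) :
    ∀ res : Nat, res ≠ 0 → (∀ i ∈ l, (1 : Int) ≤ i) →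
      l.foldl (fun r i => pvStep r i.toNat) res
        = l.foldl (fun r i => r * i.toNat / pvGcd r i.toNat) res := by
  induction l with
  | nil => intro res _ _; rfl
  | cons i t ih =>
    intro res hres hmem
    have hi : 1 ≤ i := hmem i (by simp)
    have hit : i.toNat ≠ 0 := by omega
    simp only [List.foldl_cons]
    have hstep : pvStep res i.toNat = Nat.lcm res i.toNat :=
      pvStep_eq res i.toNat hres (by omega)
    have hstep' : res * i.toNat / pvGcd res i.toNat = Nat.lcm res i.toNat := by
      rw [pvGcd_eq, Nat.gcd_comm, Nat.lcm]
    rw [hstep, hstep']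
    exact ih _ (Nat.lcm_ne_zero hres hit) (fun x hx => hmem x (by simp [hx]))

theorem pv_main (k : Int) : smallest_nb k = smallest_nb_alt k := by
  unfold smallest_nb smallest_nb_alt
  congr 1
  by_cases hk : 1 ≤ k
  · rw [PySem.List.pyRange_one_cons (show (1:Int) < k+1 by omega)]
    rw [List.foldl_cons]
    have h11 : pvStep 1 (Int.toNat 1) = 1 := by
      rw [show Int.toNat 1 = 1 from rfl, pvStep_eq 1 1 one_ne_zero (le_refl 1)]
      simp
    rw [h11]
    exact pv_fold_eq _ 1 one_ne_zero
      (fun i hi => by have := (PySem.List.mem_pyRange_one.mp hi).1; omega)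
  · have h1 : PySem.List.pyRange 1 (k+1) 1 = [] := by
      rw [PySem.List.pyRange_one]
      have : (k + 1 - 1).toNat = 0 := by omega
      rw [this]; rfl
    have h2 : PySem.List.pyRange 2 (k+1) 1 = [] := by
      rw [PySem.List.pyRange_one]
      have : (k + 1 - 2).toNat = 0 := by omega
      rw [this]; rfl
    rw [h1, h2]
    rfl

-- ===== VERDICT (by name: the statement is the Claim_ definition above) =====
theorem smallest_nb_spec : Claim_equal_smallest_nb := by
  intro k _
  exact pv_main k
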